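-- pv_equiv track=rewrite | github.com/Papajohn77/DSA-Assignments | assignment-2021-3/beckett_gray.py | find_reverse_isomorphisms
-- ===== SOURCE A (Python) =====
-- from itertools import permutations
--
-- def find_reverse_isomorphisms(bgc_delta, number_of_bits):
--     reverse_isomorphisms = []
--     coordinates = [str(n) for n in range(number_of_bits)]
--     for delta in bgc_delta:
--         for potential_match in bgc_delta:
--             if delta == potential_match:
--                 continue
--
--             rev_potential_match = potential_match[::-1]
--             perms = permutations(coordinates, number_of_bits)
--             for perm in perms:
--                 permuted_delta = ''
--                 for letter in delta:
--                     for i in range(number_of_bits):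
--                         if letter == coordinates[i]:
--                             permuted_delta += perm[i]
--
--                 if permuted_delta == rev_potential_match and ((potential_match, delta) not in reverse_isomorphisms):
--                     reverse_isomorphisms.append((delta, potential_match))
--     return reverse_isomorphisms
-- ===== SOURCE B (Python) =====
-- from itertools import permutations
--
-- def find_reverse_isomorphisms(bgc_delta, number_of_bits):
--     coordinates = [str(i) for i in range(number_of_bits)]
--     counters = {}
--     result = []
--     for delta in bgc_delta:
--         for potential_match in bgc_delta:
--             if delta == potential_match:
--                 continue
--             if (potential_match, delta) in result:
--                 continue
--             if delta not in counters:
--                 counter = {}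
--                 for perm in permutations(coordinates, number_of_bits):
--                     trans = dict(zip(coordinates, perm))
--                     image = ''.join(trans.get(ch, '') for ch in delta)
--                     counter[image] = counter.get(image, 0) + 1
--                 counters[delta] = counter
--             count = counters[delta].get(potential_match[::-1], 0)
--             result.extend([(delta, potential_match)] * count)
--     return result
-- ===== Notes on version B (the rewrite author's own statement) =====
-- stated objective: alternative
-- what changed: B memoizes, per distinct delta, a Counter of all its permuted images (built once over the n! permutations, translating letters through dict(zip(coordinates, perm)) instead of A's per-letter linear scan of the coordinate list) and then serves every ordered pair by a single dictionary lookup, extending the result by count copies at once, instead of A re-enumerating all n! permutations and rebuilding the permuted string for every pair; …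
-- outside the precondition, e.g. on find_reverse_isomorphisms(['a', 'b'], -1): A raises ValueError, B raises ValueError
import Mathlib
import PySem

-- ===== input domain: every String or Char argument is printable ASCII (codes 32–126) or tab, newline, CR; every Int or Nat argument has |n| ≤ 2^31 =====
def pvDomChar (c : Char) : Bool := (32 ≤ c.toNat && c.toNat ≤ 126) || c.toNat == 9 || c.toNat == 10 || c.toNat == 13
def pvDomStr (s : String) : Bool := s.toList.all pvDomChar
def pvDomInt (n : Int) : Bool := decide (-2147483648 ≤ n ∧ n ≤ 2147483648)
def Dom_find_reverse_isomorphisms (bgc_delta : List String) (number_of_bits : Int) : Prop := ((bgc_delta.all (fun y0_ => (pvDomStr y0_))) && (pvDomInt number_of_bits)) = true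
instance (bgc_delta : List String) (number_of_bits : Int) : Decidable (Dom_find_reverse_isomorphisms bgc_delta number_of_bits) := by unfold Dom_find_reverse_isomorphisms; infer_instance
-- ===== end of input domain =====

-- B replaces A's per-pair enumeration of all n! coordinate permutations by a memoized
-- per-delta Counter of permuted images, looked up once per pair (same return value).

-- ===== PORT A =====

-- coordinates = [str(n) for n in range(number_of_bits)]  (strings kept as List Char; exact)
def pvCoords (number_of_bits : Int) : List (List Char) :=
  (PySem.List.pyRange 0 number_of_bits 1).map (fun i => PySem.Int.toChars i)

-- the inner 'permuted_delta' loop of A: for letter in delta: for i in range(number_of_bits): …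
def pvPermuteA (delta : List Char) (coords perm : List (List Char)) (number_of_bits : Int) : List Char :=
  delta.foldl (fun acc letter =>
    (PySem.List.pyRange 0 number_of_bits 1).foldl (fun acc2 i =>
      if [letter] = PySem.List.pyGetD coords i [] then acc2 ++ PySem.List.pyGetD perm i [] else acc2)
      acc) []

def find_reverse_isomorphisms (bgc_delta : List String) (number_of_bits : Int) : List (String × String) :=
  let coordinates := pvCoords number_of_bits
  bgc_delta.foldl (fun acc delta =>
    bgc_delta.foldl (fun acc potential_match =>
      if delta = potential_match then acc
      else
        -- potential_match[::-1] is the reverse (PySem.Str.slice?_none_none_neg_one)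
        let rev := potential_match.toList.reverse
        let perms := PySem.List.permutations coordinates number_of_bits.toNat
        perms.foldl (fun acc2 perm =>
          if pvPermuteA delta.toList coordinates perm number_of_bits = rev
              ∧ (potential_match, delta) ∉ acc2
          then acc2 ++ [(delta, potential_match)] else acc2) acc) acc) []

-- ===== PORT B =====

-- trans = dict(zip(coordinates, perm))
def pvTrans (coords perm : List (List Char)) : PySem.Dict (List Char) (List Char) :=
  (coords.zip perm).foldl (fun t cp => t.insert cp.1 cp.2) PySem.Dict.empty

-- image = ''.join(trans.get(ch, '') for ch in delta)
def pvImageB (delta : List Char) (trans : PySem.Dict (List Char) (List Char)) : List Char :=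
  delta.foldl (fun acc ch => acc ++ trans.getD [ch] []) []

-- counter = {}; for perm in permutations(coordinates, number_of_bits): counter[image] = counter.get(image, 0) + 1
def pvCounterB (delta : List Char) (coords : List (List Char)) (r : Nat) : PySem.Dict (List Char) Int :=
  (PySem.List.permutations coords r).foldl (fun c perm =>
    c.insert (pvImageB delta (pvTrans coords perm))
      (c.getD (pvImageB delta (pvTrans coords perm)) 0 + 1)) PySem.Dict.empty

def find_reverse_isomorphisms_alt (bgc_delta : List String) (number_of_bits : Int) : List (String × String) :=
  let coordinates := pvCoords number_of_bits
  let st := bgc_delta.foldl (fun st delta =>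
    bgc_delta.foldl (fun st potential_match =>
      if delta = potential_match then st
      else if (potential_match, delta) ∈ st.2 then st
      else
        let counters := if st.1.contains delta then st.1
          else st.1.insert delta (pvCounterB delta.toList coordinates number_of_bits.toNat)
        -- count = counters[delta].get(potential_match[::-1], 0); result += [(delta, pm)] * count
        let cnt := (counters.getD delta PySem.Dict.empty).getD potential_match.toList.reverse 0
        (counters, st.2 ++ List.replicate cnt.toNat (delta, potential_match)))
      st)
    ((PySem.Dict.empty : PySem.Dict String (PySem.Dict (List Char) Int)), ([] : List (String × String)))
  st.2

-- ===== PRECONDITION & SPEC =====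
-- Pre_ excludes exactly the inputs where Python A raises ValueError: a negative number_of_bits
-- together with at least one pair of distinct list elements (there itertools.permutations(coords, r)
-- is created with r < 0); with all elements equal the permutations call is never reached and A returns [].
def Pre_find_reverse_isomorphisms (bgc_delta : List String) (number_of_bits : Int) : Prop :=
  0 ≤ number_of_bits ∨ ∀ x ∈ bgc_delta, ∀ y ∈ bgc_delta, x = y
instance (bgc_delta : List String) (number_of_bits : Int) : Decidable (Pre_find_reverse_isomorphisms bgc_delta number_of_bits) := by unfold Pre_find_reverse_isomorphisms; infer_instance
def pvWitness_find_reverse_isomorphisms : List String × Int := (["01", "10"], 2)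

def Spec_find_reverse_isomorphisms (bgc_delta : List String) (number_of_bits : Int) (out : List (String × String)) : Prop := out = find_reverse_isomorphisms_alt bgc_delta number_of_bits
instance (bgc_delta : List String) (number_of_bits : Int) (out : List (String × String)) : Decidable (Spec_find_reverse_isomorphisms bgc_delta number_of_bits out) := by unfold Spec_find_reverse_isomorphisms; infer_instance

-- ===== CLAIM (what is proved, stated in full; the proofs are below) =====
def Claim_equal_find_reverse_isomorphisms : Prop := ∀ (bgc_delta : List String) (number_of_bits : Int), Dom_find_reverse_isomorphisms bgc_delta number_of_bits → Pre_find_reverse_isomorphisms bgc_delta number_of_bits → Spec_find_reverse_isomorphisms bgc_delta number_of_bits (find_reverse_isomorphisms bgc_delta number_of_bits)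

-- ===== LEMMAS AND PROOFS =====

-- str(·) is injective on the digit characters
theorem pv_digitChar_inj : ∀ a < 10, ∀ b < 10, Nat.digitChar a = Nat.digitChar b → a = b := by
  decide

theorem pv_toDigits_inj : ∀ (a b : Nat), Nat.toDigits 10 a = Nat.toDigits 10 b → a = b := by
  intro a
  induction a using Nat.strong_induction_on with
  | _ a ih =>
    intro b h
    rcases Nat.lt_or_ge a 10 with ha | ha <;> rcases Nat.lt_or_ge b 10 with hb | hb
    · rw [Nat.toDigits_of_lt_base ha, Nat.toDigits_of_lt_base hb] at h
      exact pv_digitChar_inj a ha b hb (List.singleton_inj.mp h)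
    · rw [Nat.toDigits_of_lt_base ha, Nat.toDigits_of_base_le (by norm_num) hb] at h
      have hl := congrArg List.length h
      simp only [List.length_singleton, List.length_append] at hl
      have := Nat.length_toDigits_pos (b := 10) (n := b / 10)
      omega
    · rw [Nat.toDigits_of_lt_base hb, Nat.toDigits_of_base_le (by norm_num) ha] at h
      have hl := congrArg List.length h
      simp only [List.length_singleton, List.length_append] at hl
      have := Nat.length_toDigits_pos (b := 10) (n := a / 10)
      omega
    · rw [Nat.toDigits_of_base_le (by norm_num) ha, Nat.toDigits_of_base_le (by norm_num) hb] at h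
      have h2 := List.append_inj' h (by simp)
      have hdiv : a / 10 = b / 10 :=
        ih (a / 10) (Nat.div_lt_self (by omega) (by norm_num)) _ h2.1
      have hmod : a % 10 = b % 10 :=
        pv_digitChar_inj _ (Nat.mod_lt _ (by norm_num)) _ (Nat.mod_lt _ (by norm_num))
          (List.singleton_inj.mp h2.2)
      omega

theorem pv_coords_nodup (n : Int) : (pvCoords n).Nodup := by
  unfold pvCoords
  rw [PySem.List.pyRange_one]
  simp only [List.map_map]
  apply List.Nodup.map _ (List.nodup_range)
  intro a b h
  simp only [Function.comp_apply, zero_add, PySem.Int.toChars] at h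
  have ha : ¬ ((a : Int) < 0) := by omega
  have hb : ¬ ((b : Int) < 0) := by omega
  rw [if_neg ha, if_neg hb] at h
  simpa using pv_toDigits_inj _ _ (by simpa using h)

-- folding inserts over a list affects getD at k only through the start dict's get? at k
theorem pv_fold_insert_get?_congr (l : List (List Char × List Char))
    (t t' : PySem.Dict (List Char) (List Char)) (k : List Char)
    (h : t.get? k = t'.get? k) :
    (l.foldl (fun t cp => t.insert cp.1 cp.2) t).get? k
      = (l.foldl (fun t cp => t.insert cp.1 cp.2) t').get? k := by
  induction l generalizing t t' with
  | nil => simpa using h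
  | cons cp l ih =>
    simp only [List.foldl_cons]
    apply ih
    by_cases hk : k = cp.1
    · subst hk; rw [PySem.Dict.get?_insert_self, PySem.Dict.get?_insert_self]
    · rw [PySem.Dict.get?_insert_of_ne _ _ hk, PySem.Dict.get?_insert_of_ne _ _ hk, h]

theorem pv_fold_insert_get?_notmem (cs ps : List (List Char))
    (t : PySem.Dict (List Char) (List Char)) (k : List Char) (hk : k ∉ cs) :
    ((cs.zip ps).foldl (fun t cp => t.insert cp.1 cp.2) t).get? k = t.get? k := by
  induction cs generalizing ps t with
  | nil => simp
  | cons c cs ih =>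
    cases ps with
    | nil => simp
    | cons p ps =>
      simp only [List.zip_cons_cons, List.foldl_cons]
      rw [ih _ _ (by simp at hk; exact hk.2)]
      exact PySem.Dict.get?_insert_of_ne _ _ (by simp at hk; exact hk.1)

theorem pv_range_fold_skip (cs ps : List (List Char)) (k : List Char) (acc : List Char)
    (hk : k ∉ cs) :
    (List.range cs.length).foldl
      (fun a j => if k = cs.getD j [] then a ++ ps.getD j [] else a) acc = acc := by
  rw [PySem.List.foldl_congr_mem (g := fun a _ => a), PySem.List.foldl_ignore]
  intro a j hj
  rw [if_neg]
  intro hkc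
  have hjl : j < cs.length := by simpa using hj
  apply hk
  rw [hkc, List.getD_eq_getElem cs [] hjl]
  exact List.getElem_mem hjl

-- the per-character scan of A equals a lookup in dict(zip(coordinates, perm))
theorem pv_zipfold (cs : List (List Char)) : ∀ (ps : List (List Char)),
    cs.length = ps.length → cs.Nodup → ∀ (k : List Char) (acc : List Char),
    (List.range cs.length).foldl
      (fun a j => if k = cs.getD j [] then a ++ ps.getD j [] else a) acc
      = acc ++ (pvTrans cs ps).getD k [] := by
  induction cs with
  | nil =>
    intro ps _ _ k acc
    simp [pvTrans, PySem.Dict.getD_eq_get?_getD, PySem.Dict.get?_empty]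
  | cons c cs ih =>
    intro ps hlen hnd k acc
    cases ps with
    | nil => simp at hlen
    | cons p ps =>
      simp only [List.length_cons, List.range_succ_eq_map, List.foldl_cons, List.foldl_map]
      have hstep : ∀ (a : List Char) (j : Nat),
          (if k = (c :: cs).getD (Nat.succ j) [] then a ++ (p :: ps).getD (Nat.succ j) [] else a)
            = (if k = cs.getD j [] then a ++ ps.getD j [] else a) := by
        intro a j; rfl
      have hnd' : cs.Nodup := hnd.of_cons
      have hcn : c ∉ cs := by simp at hnd; exact hnd.1
      have hlen' : cs.length = ps.length := by simpa using hlen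
      simp only [List.getD_cons_zero]
      by_cases hkc : k = c
      · subst hkc
        rw [if_pos rfl]
        calc (List.range cs.length).foldl
              (fun a j => if k = (k :: cs).getD (j + 1) [] then a ++ (p :: ps).getD (j + 1) [] else a)
              (acc ++ p)
            = (List.range cs.length).foldl
              (fun a j => if k = cs.getD j [] then a ++ ps.getD j [] else a) (acc ++ p) := by
              apply PySem.List.foldl_congr_mem; intro a j _; exact hstep a j
          _ = acc ++ p := pv_range_fold_skip cs ps k (acc ++ p) hcn
          _ = acc ++ (pvTrans (k :: cs) (p :: ps)).getD k [] := by
              unfold pvTrans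
              simp only [List.zip_cons_cons, List.foldl_cons]
              rw [PySem.Dict.getD_eq_get?_getD,
                pv_fold_insert_get?_notmem cs ps _ k hcn,
                PySem.Dict.get?_insert_self]
              rfl
      · rw [if_neg hkc]
        calc (List.range cs.length).foldl
              (fun a j => if k = (c :: cs).getD (j + 1) [] then a ++ (p :: ps).getD (j + 1) [] else a)
              acc
            = (List.range cs.length).foldl
              (fun a j => if k = cs.getD j [] then a ++ ps.getD j [] else a) acc := by
              apply PySem.List.foldl_congr_mem; intro a j _; exact hstep a j
          _ = acc ++ (pvTrans cs ps).getD k [] := ih ps hlen' hnd' k acc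
          _ = acc ++ (pvTrans (c :: cs) (p :: ps)).getD k [] := by
              unfold pvTrans
              simp only [List.zip_cons_cons, List.foldl_cons]
              rw [PySem.Dict.getD_eq_get?_getD, PySem.Dict.getD_eq_get?_getD,
                pv_fold_insert_get?_congr (cs.zip ps) (PySem.Dict.empty.insert c p)
                  PySem.Dict.empty k (PySem.Dict.get?_insert_of_ne PySem.Dict.empty p hkc)]

-- A's permuted_delta equals B's translated image
theorem pv_image_eq (delta : List Char) (n : Int) (perm : List (List Char))
    (hlen : perm.length = (pvCoords n).length) :
    pvPermuteA delta (pvCoords n) perm n = pvImageB delta (pvTrans (pvCoords n) perm) := by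
  unfold pvPermuteA pvImageB
  apply PySem.List.foldl_congr_mem
  intro acc ch _
  have hcl : (pvCoords n).length = (n - 0).toNat := by
    unfold pvCoords
    rw [PySem.List.pyRange_one]
    simp
  have hr : PySem.List.pyRange 0 n 1 = (List.range (pvCoords n).length).map (fun (k : Nat) => ((k : Int))) := by
    rw [PySem.List.pyRange_one, hcl]
    exact List.map_congr_left fun a _ => zero_add _
  rw [hr, List.foldl_map]
  have hgd : ∀ (a : List Char) (j : Nat),
      (if [ch] = PySem.List.pyGetD (pvCoords n) (j : Int) [] then
          a ++ PySem.List.pyGetD perm (j : Int) [] else a)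
        = (if [ch] = (pvCoords n).getD j [] then a ++ perm.getD j [] else a) := by
    intro a j
    rw [PySem.List.pyGetD_natCast, PySem.List.pyGetD_natCast]
  have h2 := PySem.List.foldl_congr_mem (List.range (pvCoords n).length)
      (fun (a : List Char) (j : Nat) =>
        if [ch] = PySem.List.pyGetD (pvCoords n) (j : Int) [] then
          a ++ PySem.List.pyGetD perm (j : Int) [] else a)
      (fun (a : List Char) (j : Nat) =>
        if [ch] = (pvCoords n).getD j [] then a ++ perm.getD j [] else a)
      acc (fun a j _ => hgd a j)
  exact h2.trans (pv_zipfold (pvCoords n) perm hlen.symm (pv_coords_nodup n) [ch] acc)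

-- A's perm loop appends one copy per matching permutation, when the symmetric pair is absent
theorem pv_perm_fold_replicate (P : List (List (List Char))) (g : List (List Char) → List Char)
    (rev : List Char) (dp pd : String × String) (hne : dp ≠ pd) :
    ∀ acc : List (String × String), pd ∉ acc →
    P.foldl (fun a perm => if g perm = rev ∧ pd ∉ a then a ++ [dp] else a) acc
      = acc ++ List.replicate (P.countP (fun perm => g perm == rev)) dp := by
  induction P with
  | nil => intro acc _; simp
  | cons p P ih =>
    intro acc hacc
    simp only [List.foldl_cons, List.countP_cons]
    by_cases hg : g p = rev
    · rw [if_pos ⟨hg, hacc⟩]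
      rw [ih (acc ++ [dp]) (by
        intro hmem
        rcases List.mem_append.mp hmem with h | h
        · exact hacc h
        · exact hne (List.mem_singleton.mp h).symm)]
      simp [hg, List.replicate_succ, List.append_assoc]
    · rw [if_neg (by simp [hg]), ih acc hacc]
      simp [hg]

theorem pv_perm_fold_mem (P : List (List (List Char))) (g : List (List Char) → List Char)
    (rev : List Char) (dp pd : String × String) (acc : List (String × String)) (hacc : pd ∈ acc) :
    P.foldl (fun a perm => if g perm = rev ∧ pd ∉ a then a ++ [dp] else a) acc = acc := by
  induction P with
  | nil => rfl
  | cons p P ih =>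
    simp only [List.foldl_cons]
    rw [if_neg (by intro h; exact h.2 hacc)]
    exact ih

-- B's counter lookup counts the matching permutations
theorem pv_counter_getD (delta : List Char) (coords : List (List Char)) (r : Nat)
    (rev : List Char) :
    (pvCounterB delta coords r).getD rev 0
      = ((PySem.List.permutations coords r).countP
          (fun perm => pvImageB delta (pvTrans coords perm) == rev) : Int) := by
  unfold pvCounterB
  rw [← List.foldl_map (f := fun perm => pvImageB delta (pvTrans coords perm))
      (g := fun (c : PySem.Dict (List Char) Int) x => c.insert x (c.getD x 0 + 1)),
    PySem.Dict.getD_foldl_insert_add_one]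
  simp [PySem.Dict.getD_eq_get?_getD, PySem.Dict.get?_empty, List.count,
    List.countP_map, Function.comp_def]

-- invariant: every counter stored in B's dict is the counter of its key
def pvGood (n : Int) (cs : PySem.Dict String (PySem.Dict (List Char) Int)) : Prop :=
  ∀ d c, cs.get? d = some c → c = pvCounterB d.toList (pvCoords n) n.toNat

theorem pv_coords_length (n : Int) : (pvCoords n).length = n.toNat := by
  unfold pvCoords
  rw [PySem.List.pyRange_one]
  simp

theorem pv_pair_fold_eq (n : Int) (delta potential_match : String)
    (res : List (String × String)) (h1 : ¬ delta = potential_match)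
    (h2 : (potential_match, delta) ∉ res) :
    (PySem.List.permutations (pvCoords n) n.toNat).foldl (fun acc2 perm =>
        if pvPermuteA delta.toList (pvCoords n) perm n = potential_match.toList.reverse
            ∧ (potential_match, delta) ∉ acc2
        then acc2 ++ [(delta, potential_match)] else acc2) res
      = res ++ List.replicate
          ((pvCounterB delta.toList (pvCoords n) n.toNat).getD
            potential_match.toList.reverse 0).toNat (delta, potential_match) := by
  have hcong : (PySem.List.permutations (pvCoords n) n.toNat).foldl (fun acc2 perm =>
      if pvPermuteA delta.toList (pvCoords n) perm n = potential_match.toList.reverse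
          ∧ (potential_match, delta) ∉ acc2
      then acc2 ++ [(delta, potential_match)] else acc2) res
      = (PySem.List.permutations (pvCoords n) n.toNat).foldl (fun acc2 perm =>
      if pvImageB delta.toList (pvTrans (pvCoords n) perm) = potential_match.toList.reverse
          ∧ (potential_match, delta) ∉ acc2
      then acc2 ++ [(delta, potential_match)] else acc2) res := by
    apply PySem.List.foldl_congr_mem
    intro acc2 perm hmem
    have hlen : perm.length = (pvCoords n).length := by
      rw [PySem.List.length_of_mem_permutations hmem, pv_coords_length]
    rw [pv_image_eq delta.toList n perm hlen]
  rw [hcong]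
  rw [pv_perm_fold_replicate (PySem.List.permutations (pvCoords n) n.toNat)
      (fun perm => pvImageB delta.toList (pvTrans (pvCoords n) perm))
      potential_match.toList.reverse (delta, potential_match) (potential_match, delta)
      (by intro h; exact h1 (congrArg Prod.fst h)) res h2]
  rw [pv_counter_getD]
  simp

theorem pv_inner_eq (n : Int) (delta : String) (pmList : List String) :
    ∀ (cs : PySem.Dict String (PySem.Dict (List Char) Int)) (res : List (String × String)),
    pvGood n cs →
    (pmList.foldl (fun st potential_match =>
        if delta = potential_match then st
        else if (potential_match, delta) ∈ st.2 then st
        else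
          let counters := if st.1.contains delta then st.1
            else st.1.insert delta (pvCounterB delta.toList (pvCoords n) n.toNat)
          let cnt := (counters.getD delta PySem.Dict.empty).getD potential_match.toList.reverse 0
          (counters, st.2 ++ List.replicate cnt.toNat (delta, potential_match)))
      (cs, res)).2
      = pmList.foldl (fun acc potential_match =>
          if delta = potential_match then acc
          else
            (PySem.List.permutations (pvCoords n) n.toNat).foldl (fun acc2 perm =>
              if pvPermuteA delta.toList (pvCoords n) perm n = potential_match.toList.reverse
                  ∧ (potential_match, delta) ∉ acc2
              then acc2 ++ [(delta, potential_match)] else acc2) acc) res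
    ∧ pvGood n (pmList.foldl (fun st potential_match =>
        if delta = potential_match then st
        else if (potential_match, delta) ∈ st.2 then st
        else
          let counters := if st.1.contains delta then st.1
            else st.1.insert delta (pvCounterB delta.toList (pvCoords n) n.toNat)
          let cnt := (counters.getD delta PySem.Dict.empty).getD potential_match.toList.reverse 0
          (counters, st.2 ++ List.replicate cnt.toNat (delta, potential_match)))
      (cs, res)).1 := by
  induction pmList with
  | nil => intro cs res hG; exact ⟨rfl, hG⟩
  | cons pm rest ih =>
    intro cs res hG
    simp only [List.foldl_cons]
    by_cases h1 : delta = pm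
    · rw [if_pos h1, if_pos h1]
      exact ih cs res hG
    · rw [if_neg h1, if_neg h1]
      by_cases h2 : (pm, delta) ∈ res
      · rw [if_pos h2, pv_perm_fold_mem _ _ _ _ _ res h2]
        exact ih cs res hG
      · rw [if_neg h2]
        set counters := if cs.contains delta then cs
          else cs.insert delta (pvCounterB delta.toList (pvCoords n) n.toNat) with hcounters
        have hGood' : pvGood n counters := by
          rw [hcounters]
          split_ifs with hc
          · exact hG
          · intro d c hget
            rw [PySem.Dict.get?_insert] at hget
            split_ifs at hget with hd
            · subst hd; exact (Option.some_inj.mp hget).symm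
            · exact hG d c hget
        have hCnt : counters.getD delta PySem.Dict.empty
            = pvCounterB delta.toList (pvCoords n) n.toNat := by
          rw [hcounters]
          split_ifs with hc
          · rw [PySem.Dict.contains_eq_isSome_get?] at hc
            obtain ⟨c, hcget⟩ := Option.isSome_iff_exists.mp hc
            rw [PySem.Dict.getD_eq_get?_getD, hcget]
            simpa using hG delta c hcget
          · rw [PySem.Dict.getD_insert_self]
        rw [pv_pair_fold_eq n delta pm res h1 h2]
        simp only [hCnt]
        exact ih counters (res ++ List.replicate
          ((pvCounterB delta.toList (pvCoords n) n.toNat).getD pm.toList.reverse 0).toNat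
          (delta, pm)) hGood'

theorem pv_outer_eq (n : Int) (L : List String) (dl : List String) :
    ∀ (cs : PySem.Dict String (PySem.Dict (List Char) Int)) (res : List (String × String)),
    pvGood n cs →
    (dl.foldl (fun st delta =>
        L.foldl (fun st potential_match =>
          if delta = potential_match then st
          else if (potential_match, delta) ∈ st.2 then st
          else
            let counters := if st.1.contains delta then st.1
              else st.1.insert delta (pvCounterB delta.toList (pvCoords n) n.toNat)
            let cnt := (counters.getD delta PySem.Dict.empty).getD potential_match.toList.reverse 0
            (counters, st.2 ++ List.replicate cnt.toNat (delta, potential_match))) st)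
      (cs, res)).2
      = dl.foldl (fun acc delta =>
          L.foldl (fun acc potential_match =>
            if delta = potential_match then acc
            else
              (PySem.List.permutations (pvCoords n) n.toNat).foldl (fun acc2 perm =>
                if pvPermuteA delta.toList (pvCoords n) perm n = potential_match.toList.reverse
                    ∧ (potential_match, delta) ∉ acc2
                then acc2 ++ [(delta, potential_match)] else acc2) acc) acc) res := by
  induction dl with
  | nil => intro cs res _; rfl
  | cons delta rest ih =>
    intro cs res hG
    simp only [List.foldl_cons]
    obtain ⟨heq, hGood'⟩ := pv_inner_eq n delta L cs res hG
    have hpair : (L.foldl (fun st potential_match =>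
        if delta = potential_match then st
        else if (potential_match, delta) ∈ st.2 then st
        else
          let counters := if st.1.contains delta then st.1
            else st.1.insert delta (pvCounterB delta.toList (pvCoords n) n.toNat)
          let cnt := (counters.getD delta PySem.Dict.empty).getD potential_match.toList.reverse 0
          (counters, st.2 ++ List.replicate cnt.toNat (delta, potential_match)))
      (cs, res))
      = ((L.foldl (fun st potential_match =>
        if delta = potential_match then st
        else if (potential_match, delta) ∈ st.2 then st
        else
          let counters := if st.1.contains delta then st.1
            else st.1.insert delta (pvCounterB delta.toList (pvCoords n) n.toNat)
          let cnt := (counters.getD delta PySem.Dict.empty).getD potential_match.toList.reverse 0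
          (counters, st.2 ++ List.replicate cnt.toNat (delta, potential_match)))
      (cs, res)).1,
      L.foldl (fun acc potential_match =>
          if delta = potential_match then acc
          else
            (PySem.List.permutations (pvCoords n) n.toNat).foldl (fun acc2 perm =>
              if pvPermuteA delta.toList (pvCoords n) perm n = potential_match.toList.reverse
                  ∧ (potential_match, delta) ∉ acc2
              then acc2 ++ [(delta, potential_match)] else acc2) acc) res) := by
      rw [← heq]
    rw [hpair]
    exact ih _ _ hGood'

theorem pv_main (bgc_delta : List String) (n : Int) :
    find_reverse_isomorphisms bgc_delta n = find_reverse_isomorphisms_alt bgc_delta n := by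
  unfold find_reverse_isomorphisms find_reverse_isomorphisms_alt
  exact (pv_outer_eq n bgc_delta bgc_delta PySem.Dict.empty []
    (fun d c h => by rw [PySem.Dict.get?_empty] at h; exact absurd h (by simp))).symm

-- ===== VERDICT (by name: the statement is the Claim_ definition above) =====
theorem find_reverse_isomorphisms_spec : Claim_equal_find_reverse_isomorphisms := by
  intro bgc_delta number_of_bits _ _
  unfold Spec_find_reverse_isomorphisms
  exact pv_main bgc_delta number_of_bits
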